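-- pv_equiv track=rewrite | github.com/VishA1308/ML-project-23931 | db/T9.py | correct_text
-- ===== SOURCE A (Python) =====
-- def correct_text(input_text, dictionaries):
--
--     def distance(a, b):
--         n, m = len(a), len(b)
--         if n == 0:
--             return m
--         if m == 0:
--             return n
--
--         if n > m:
--             a, b = b, a
--             n, m = m, n
--
--         current_row = list(range(n + 1))
--         for i in range(1, m + 1):
--             previous_row, current_row = current_row, [i] + [0] * n
--             for j in range(1, n + 1):
--                 add = previous_row[j] + 1
--                 delete = current_row[j - 1] + 1
--                 change = previous_row[j - 1]
--                 if a[j - 1] != b[i - 1]: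
--                     change += 1
--                 current_row[j] = min(add, delete, change)
--
--         return current_row[n]
--
--     # Разделяем входной текст на фразы
--     phrases = input_text.split('. ')
--     corrected_phrases = []
--
--     for phrase in phrases:
--         closest_phrase = None
--         min_distance = float('inf')
--
--         # Проверяем каждое слово в каждом словаре
--         for dictionary in dictionaries:
--             for dict_phrase in dictionary:
--                 dist = distance(phrase.lower(), dict_phrase.lower())
--                 if dist < min_distance:
--                     min_distance = dist
--                     closest_phrase = dict_phrase
--
--         # Если расстояние меньше или равно 3, заменяем фразу
--         if min_distance <= 3 and closest_phrase is not None: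
--             corrected_phrases.append(closest_phrase)
--         else:
--             corrected_phrases.append(phrase)
--
--     return '. '.join(corrected_phrases)
-- ===== SOURCE B (Python) =====
-- def correct_text(input_text, dictionaries):
--
--     def distance(a, b):
--         # top-down memoized edit distance over prefix index pairs (i, j)
--         memo = {}
--
--         def f(i, j):
--             if i == 0:
--                 return j
--             if j == 0:
--                 return i
--             if (i, j) in memo:
--                 return memo[(i, j)]
--             cost = 0 if a[i - 1] == b[j - 1] else 1
--             v = min(f(i - 1, j) + 1, f(i, j - 1) + 1, f(i - 1, j - 1) + cost)
--             memo[(i, j)] = v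
--             return v
--
--         # warm the memo on increasing index pairs so each call recurses O(1) deep
--         # (pure Python has a low recursion limit; values are unchanged)
--         for i in range(len(a) + 1):
--             for j in range(len(b) + 1):
--                 f(i, j)
--         return f(len(a), len(b))
--
--     phrases = input_text.split('. ')
--     corrected_phrases = []
--     for phrase in phrases:
--         closest_phrase = None
--         min_distance = None  # None means +infinity
--         for dictionary in dictionaries:
--             for dict_phrase in dictionary:
--                 dist = distance(phrase.lower(), dict_phrase.lower())
--                 if min_distance is None or dist < min_distance:
--                     min_distance = dist
--                     closest_phrase = dict_phrase
--         if min_distance is not None and min_distance <= 3: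
--             corrected_phrases.append(closest_phrase)
--         else:
--             corrected_phrases.append(phrase)
--     return '. '.join(corrected_phrases)
-- ===== Notes on version B (the rewrite author's own statement) =====
-- stated objective: alternative
-- what changed: The inner edit distance is recomputed top-down: a recursive f(i, j) over prefix index pairs memoized in a dict (with a warm-up loop over index pairs that keeps each recursive call shallow) replaces A's bottom-up two-row iterative DP with its shorter-string swap; the outer phrase/dictionary scan and the <=3 threshold are unchanged.
import Mathlib
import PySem

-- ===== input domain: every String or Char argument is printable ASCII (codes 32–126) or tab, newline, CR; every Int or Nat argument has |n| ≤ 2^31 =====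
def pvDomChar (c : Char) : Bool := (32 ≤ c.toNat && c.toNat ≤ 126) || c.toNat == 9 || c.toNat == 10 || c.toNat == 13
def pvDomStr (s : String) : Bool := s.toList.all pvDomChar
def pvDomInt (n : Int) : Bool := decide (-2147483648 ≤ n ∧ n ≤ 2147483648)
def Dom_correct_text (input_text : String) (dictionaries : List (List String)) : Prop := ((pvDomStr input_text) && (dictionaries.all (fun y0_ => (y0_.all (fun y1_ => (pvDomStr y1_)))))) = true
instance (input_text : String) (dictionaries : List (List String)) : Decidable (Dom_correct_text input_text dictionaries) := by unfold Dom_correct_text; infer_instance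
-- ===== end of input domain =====

-- B replaces A's two-row bottom-up Levenshtein loop with a top-down memoized
-- recursion over prefix index pairs (i, j); the outer phrase/dictionary scan and
-- the ≤3 replacement threshold are unchanged.  Objective: alternative.

-- ===== PORT A =====
-- A's inner `distance`: iterative two-row DP, swapping so the shorter string indexes columns.
-- body of `for j in range(1, n + 1)` (t = j - 1)
def innerStep (a b : List Char) (prev : List Nat) (i : Nat) (cur : List Nat) (t : Nat) : List Nat :=
  let j := t + 1
  let add := prev.getD j 0 + 1
  let del := cur.getD (j - 1) 0 + 1
  let change := prev.getD (j - 1) 0 + (if a.getD (j - 1) ' ' ≠ b.getD (i - 1) ' ' then 1 else 0)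
  cur.set j (min (min add del) change)

-- body of `for i in range(1, m + 1)`: previous_row := cur, current_row := [i] + [0] * n, inner loop
def innerLoop (a b : List Char) (prev : List Nat) (i : Nat) : List Nat :=
  (List.range a.length).foldl (innerStep a b prev i) (i :: List.replicate a.length 0)

def outerLoop (a b : List Char) : List Nat :=
  (List.range b.length).foldl (fun cur k => innerLoop a b cur (k + 1)) (List.range (a.length + 1))

def distA (a b : List Char) : Nat :=
  let n := a.length
  let m := b.length
  if n = 0 then m
  else if m = 0 then n
  else
    let p := if n > m then (b, a) else (a, b)
    (outerLoop p.1 p.2).getD p.1.length 0   -- return current_row[n]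

def correct_text (input_text : String) (dictionaries : List (List String)) : String :=
  let phrases := ((PySem.Str.split? input_text ". ").getD [])  -- sep ". " ≠ "", so split? is `some`
  let corrected := phrases.foldl (fun acc phrase =>
    let r := dictionaries.foldl (fun st dictionary =>
      dictionary.foldl (fun st dict_phrase =>
        let dist := distA (PySem.Str.lower phrase).toList (PySem.Str.lower dict_phrase).toList
        match st with
        | (_, none) => (some dict_phrase, some dist)       -- dist < inf
        | (c, some md) => if dist < md then (some dict_phrase, some dist) else (c, some md))
        st) ((none : Option String), (none : Option Nat))
    acc ++ [match r with
            | (some c, some md) => if md ≤ 3 then c else phrase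
            | _ => phrase]) []
  PySem.Str.join ". " corrected

-- ===== PORT B =====
-- B's inner `f(i, j)` with its memo dict threaded through (returns value and updated memo).
def memoF (a b : List Char) : Nat → Nat → PySem.Dict (Nat × Nat) Nat → Nat × PySem.Dict (Nat × Nat) Nat
  | 0, j, memo => (j, memo)
  | i + 1, 0, memo => (i + 1, memo)
  | i + 1, j + 1, memo =>
    match memo.get? (i + 1, j + 1) with
    | some v => (v, memo)
    | none =>
      let cost : Nat := if a.getD i ' ' = b.getD j ' ' then 0 else 1
      let r1 := memoF a b i (j + 1) memo
      let r2 := memoF a b (i + 1) j r1.2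
      let r3 := memoF a b i j r2.2
      let v := min (min (r1.1 + 1) (r2.1 + 1)) (r3.1 + cost)
      (v, r3.2.insert (i + 1, j + 1) v)

def distB (a b : List Char) : Nat :=
  -- warm the memo on increasing index pairs (keeps the Python recursion shallow; values unchanged)
  let memo := (List.range (a.length + 1)).foldl (fun memo i =>
    (List.range (b.length + 1)).foldl (fun memo j => (memoF a b i j memo).2) memo)
    PySem.Dict.empty
  (memoF a b a.length b.length memo).1

def correct_text_alt (input_text : String) (dictionaries : List (List String)) : String :=
  let phrases := ((PySem.Str.split? input_text ". ").getD [])  -- sep ". " ≠ "", so split? is `some`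
  let corrected := phrases.foldl (fun acc phrase =>
    let r := dictionaries.foldl (fun st dictionary =>
      dictionary.foldl (fun st dict_phrase =>
        let dist := distB (PySem.Str.lower phrase).toList (PySem.Str.lower dict_phrase).toList
        match st.2 with                                    -- min_distance is None?
        | none => (some dict_phrase, some dist)
        | some md => if dist < md then (some dict_phrase, some dist) else st)
        st) ((none : Option String), (none : Option Nat))
    acc ++ [match r.2 with                                 -- min_distance is not None and ≤ 3?
            | some md => if md ≤ 3 then r.1.getD phrase else phrase
            | none => phrase]) []
  PySem.Str.join ". " corrected

-- ===== PRECONDITION & SPEC =====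
def Spec_correct_text (input_text : String) (dictionaries : List (List String)) (out : String) : Prop := out = correct_text_alt input_text dictionaries
instance (input_text : String) (dictionaries : List (List String)) (out : String) : Decidable (Spec_correct_text input_text dictionaries out) := by unfold Spec_correct_text; infer_instance

-- ===== CLAIM (what is proved, stated in full; the proofs are below) =====
def Claim_equal_correct_text : Prop := ∀ (input_text : String) (dictionaries : List (List String)), Dom_correct_text input_text dictionaries → Spec_correct_text input_text dictionaries (correct_text input_text dictionaries)

-- ===== LEMMAS AND PROOFS =====

-- Reference edit distance on prefix index pairs (grouped as A's min(min(add, delete), change)).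
def ed (a b : List Char) : Nat → Nat → Nat
  | 0, j => j
  | i + 1, 0 => i + 1
  | i + 1, j + 1 =>
    min (min (ed a b (i + 1) j + 1) (ed a b i (j + 1) + 1))
      (ed a b i j + if a.getD i ' ' ≠ b.getD j ' ' then 1 else 0)

theorem ed_zero_right (a b : List Char) (i : Nat) : ed a b i 0 = i := by
  cases i <;> simp [ed]

theorem ed_symm (a b : List Char) (i j : Nat) : ed a b i j = ed b a j i := by
  induction i generalizing j with
  | zero => cases j <;> simp [ed]
  | succ i ih =>
    induction j with
    | zero => simp [ed]
    | succ j ihj =>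
      have hc : (if a.getD i ' ' ≠ b.getD j ' ' then (1 : Nat) else 0)
          = (if b.getD j ' ' ≠ a.getD i ' ' then (1 : Nat) else 0) := by
        split_ifs with h1 h2 <;> simp_all [eq_comm]
      simp only [ed]
      rw [ihj, ih (j + 1), ih j, hc, Nat.min_comm (ed b a j (i + 1) + 1)]

-- the memo only ever stores correct values
def MemoInv (a b : List Char) (m : PySem.Dict (Nat × Nat) Nat) : Prop :=
  ∀ i j v, m.get? (i, j) = some v → v = ed a b i j

theorem memoF_correct_aux (a b : List Char) : ∀ (N : Nat), ∀ i j, i + j ≤ N →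
    ∀ m, MemoInv a b m →
    (memoF a b i j m).1 = ed a b i j ∧ MemoInv a b (memoF a b i j m).2 := by
  intro N
  induction N with
  | zero =>
    intro i j hij m hm
    have hi : i = 0 := by omega
    subst hi
    exact ⟨by simp [memoF, ed], by simp only [memoF]; exact hm⟩
  | succ N ihN =>
    intro i j hij m hm
    rcases i with _ | i
    · exact ⟨by simp [memoF, ed], by simp only [memoF]; exact hm⟩
    rcases j with _ | j
    · exact ⟨by simp [memoF, ed], by simp only [memoF]; exact hm⟩
    rcases hv : m.get? (i + 1, j + 1) with _ | v
    · have h1 := ihN i (j + 1) (by omega) m hm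
      have h2 := ihN (i + 1) j (by omega) _ h1.2
      have h3 := ihN i j (by omega) _ h2.2
      have hval : (min (min ((memoF a b i (j + 1) m).1 + 1)
              ((memoF a b (i + 1) j (memoF a b i (j + 1) m).2).1 + 1))
            ((memoF a b i j (memoF a b (i + 1) j (memoF a b i (j + 1) m).2).2).1 +
              (if a.getD i ' ' = b.getD j ' ' then 0 else 1)))
          = ed a b (i + 1) (j + 1) := by
        rw [h1.1, h2.1, h3.1]
        have hc : (if a.getD i ' ' = b.getD j ' ' then (0 : Nat) else 1)
            = (if a.getD i ' ' ≠ b.getD j ' ' then (1 : Nat) else 0) := by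
          split_ifs <;> simp_all
        rw [hc, Nat.min_comm (ed a b i (j + 1) + 1)]
        simp [ed]
      refine ⟨?_, ?_⟩
      · show (memoF a b (i + 1) (j + 1) m).1 = _
        simp only [memoF, hv]
        exact hval
      · show MemoInv a b (memoF a b (i + 1) (j + 1) m).2
        simp only [memoF, hv]
        intro i' j' v' hv'
        rw [PySem.Dict.get?_insert] at hv'
        split at hv'
        · next heq =>
          cases heq
          cases hv'
          exact hval
        · exact h3.2 _ _ _ hv'
    · refine ⟨?_, ?_⟩
      · show (memoF a b (i + 1) (j + 1) m).1 = _
        simp only [memoF, hv]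
        exact hm _ _ _ hv
      · show MemoInv a b (memoF a b (i + 1) (j + 1) m).2
        simp only [memoF, hv]
        exact hm

theorem memoF_correct (a b : List Char) (i j : Nat) (m : PySem.Dict (Nat × Nat) Nat)
    (hm : MemoInv a b m) :
    (memoF a b i j m).1 = ed a b i j ∧ MemoInv a b (memoF a b i j m).2 :=
  memoF_correct_aux a b (i + j) i j le_rfl m hm

theorem foldl_memo_inv {α : Type} (a b : List Char)
    (step : PySem.Dict (Nat × Nat) Nat → α → PySem.Dict (Nat × Nat) Nat)
    (h : ∀ m x, MemoInv a b m → MemoInv a b (step m x)) :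
    ∀ (l : List α) (m : PySem.Dict (Nat × Nat) Nat), MemoInv a b m →
      MemoInv a b (l.foldl step m) := by
  intro l
  induction l with
  | nil => intro m hm; exact hm
  | cons x xs ih => intro m hm; exact ih _ (h _ _ hm)

theorem distB_eq (a b : List Char) : distB a b = ed a b a.length b.length := by
  have hempty : MemoInv a b PySem.Dict.empty := by
    intro i j v h
    simp [PySem.Dict.empty, PySem.Dict.get?] at h
  have hseed : MemoInv a b ((List.range (a.length + 1)).foldl (fun memo i =>
      (List.range (b.length + 1)).foldl (fun memo j => (memoF a b i j memo).2) memo)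
      PySem.Dict.empty) := by
    refine foldl_memo_inv a b _ ?_ _ _ hempty
    intro m i hm
    refine foldl_memo_inv a b _ ?_ _ _ hm
    intro m' j hm'
    exact (memoF_correct a b i j m' hm').2
  exact (memoF_correct a b a.length b.length _ hseed).1

-- row k of the DP table: distances of all prefixes of `a` against b[:k]
def rowEd (a b : List Char) (k : Nat) : List Nat :=
  (List.range (a.length + 1)).map (fun j => ed a b j k)

theorem inner_partial (a b : List Char) (i k : Nat) (hk : k ≤ a.length) :
    (List.range k).foldl (innerStep a b (rowEd a b i) (i + 1)) ((i + 1) :: List.replicate a.length 0)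
      = (List.range (a.length + 1)).map (fun j => if j ≤ k then ed a b j (i + 1) else 0) := by
  induction k with
  | zero =>
    apply List.ext_getElem
    · simp
    · intro t h1 h2
      rcases t with _ | t <;>
        simp [ed, List.getElem_map, List.getElem_range]
  | succ k ih =>
    rw [show List.range (k + 1) = List.range k ++ [k] from List.range_succ,
        List.foldl_append, List.foldl_cons, List.foldl_nil, ih (by omega)]
    unfold innerStep rowEd
    simp only [Nat.add_sub_cancel]
    rw [PySem.List.getD_map_range _ _ (k + 1) _ (by omega),
        PySem.List.getD_map_range _ _ k _ (by omega),
        PySem.List.getD_map_range _ _ k _ (by omega)]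
    apply List.ext_getElem
    · simp
    · intro t h1 h2
      simp only [List.getElem_set, List.getElem_map, List.getElem_range]
      by_cases ht : t = k + 1
      · subst ht
        simp only [le_refl, if_pos]
        show _ = ed a b (k + 1) (i + 1)
        simp [ed]
      · rw [if_neg (show ¬ (k + 1 = t) by omega)]
        split_ifs <;> first | rfl | omega

theorem innerLoop_rowEd (a b : List Char) (i : Nat) :
    innerLoop a b (rowEd a b i) (i + 1) = rowEd a b (i + 1) := by
  unfold innerLoop
  rw [inner_partial a b i a.length le_rfl]
  unfold rowEd
  refine List.map_congr_left ?_
  intro j hj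
  simp only [List.mem_range] at hj
  simp [Nat.lt_succ_iff.mp hj]

theorem outer_partial (a b : List Char) (k : Nat) (hk : k ≤ b.length) :
    (List.range k).foldl (fun cur t => innerLoop a b cur (t + 1)) (List.range (a.length + 1))
      = rowEd a b k := by
  induction k with
  | zero =>
    simp only [List.range_zero, List.foldl_nil, rowEd]
    simp [ed_zero_right]
  | succ k ih =>
    rw [show List.range (k + 1) = List.range k ++ [k] from List.range_succ,
        List.foldl_append, List.foldl_cons, List.foldl_nil, ih (by omega), innerLoop_rowEd]

theorem distA_eq (a b : List Char) : distA a b = ed a b a.length b.length := by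
  unfold distA
  by_cases h1 : a.length = 0
  · simp [h1, ed]
  by_cases h2 : b.length = 0
  · simp [h1, h2, ed_zero_right]
  rw [if_neg h1, if_neg h2]
  by_cases h3 : a.length > b.length
  · simp only [if_pos h3]
    unfold outerLoop
    rw [outer_partial b a a.length le_rfl]
    unfold rowEd
    rw [PySem.List.getD_map_range _ _ b.length _ (by omega)]
    exact ed_symm b a b.length a.length
  · simp only [if_neg h3]
    unfold outerLoop
    rw [outer_partial a b b.length le_rfl]
    unfold rowEd
    rw [PySem.List.getD_map_range _ _ a.length _ (by omega)]

theorem distA_eq_distB (a b : List Char) : distA a b = distB a b := by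
  rw [distA_eq, distB_eq]

-- ===== VERDICT (by name: the statement is the Claim_ definition above) =====
theorem correct_text_spec : Claim_equal_correct_text := by
  intro input_text dictionaries _
  unfold Spec_correct_text correct_text correct_text_alt
  simp only []
  congr 1
  apply PySem.List.foldl_congr_mem
  intro acc phrase _
  have hr : dictionaries.foldl (fun st dictionary =>
        dictionary.foldl (fun st dict_phrase =>
          let dist := distA (PySem.Str.lower phrase).toList (PySem.Str.lower dict_phrase).toList
          match st with
          | (_, none) => (some dict_phrase, some dist)
          | (c, some md) => if dist < md then (some dict_phrase, some dist) else (c, some md))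
          st) ((none : Option String), (none : Option Nat))
      = dictionaries.foldl (fun st dictionary =>
        dictionary.foldl (fun st dict_phrase =>
          let dist := distB (PySem.Str.lower phrase).toList (PySem.Str.lower dict_phrase).toList
          match st.2 with
          | none => (some dict_phrase, some dist)
          | some md => if dist < md then (some dict_phrase, some dist) else st)
          st) ((none : Option String), (none : Option Nat)) := by
    apply PySem.List.foldl_congr_mem
    intro st dictionary _
    apply PySem.List.foldl_congr_mem
    intro st' dict_phrase _
    rcases st' with ⟨c, _ | md⟩ <;> simp [distA_eq_distB]
  rw [hr]
  have h2 : ∀ (r : Option String × Option Nat),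
      (match r with
       | (some c, some md) => if md ≤ 3 then c else phrase
       | _ => phrase)
      = (match r.2 with
         | some md => if md ≤ 3 then r.1.getD phrase else phrase
         | none => phrase) := by
    intro r
    rcases r with ⟨_ | c, _ | md⟩ <;> simp
  rw [h2]
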